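-- pv_equiv track=rewrite | github.com/geneotech/GainsMUD | gns_boss_bot.py | code_block
-- ===== SOURCE A (Python) =====
-- def code_block(text: str) -> str:
--     replacements = {
--         '\\': '\\\\',
--         '`': '\\`',
--     }
--     for old, new in replacements.items():
--         text = text.replace(old, new)
--     return "```\n" + text + "\n```"
-- ===== SOURCE B (Python) =====
-- def code_block(text: str) -> str:
--     out = []
--     for c in text:
--         if c == '\\':
--             out.append('\\\\')
--         elif c == '`':
--             out.append('\\`')
--         else:
--             out.append(c)
--     return "```\n" + ''.join(out) + "\n```"
-- ===== Notes on version B (the rewrite author's own statement) =====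
-- stated objective: alternative
-- what changed: Replaced the two sequential str.replace scans with a single explicit pass over the characters that emits the escaped form of each character directly.
import Mathlib
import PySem

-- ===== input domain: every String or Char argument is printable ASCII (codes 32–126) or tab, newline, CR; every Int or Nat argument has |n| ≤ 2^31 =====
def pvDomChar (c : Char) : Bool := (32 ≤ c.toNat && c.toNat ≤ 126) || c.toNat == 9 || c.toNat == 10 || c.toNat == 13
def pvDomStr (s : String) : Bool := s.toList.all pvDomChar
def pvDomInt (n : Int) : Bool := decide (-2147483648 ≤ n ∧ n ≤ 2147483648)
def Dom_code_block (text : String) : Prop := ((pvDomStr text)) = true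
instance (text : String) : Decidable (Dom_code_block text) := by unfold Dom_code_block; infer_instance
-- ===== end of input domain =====

-- B replaces A's two sequential str.replace passes by one explicit pass over the
-- characters emitting each character's escaped form (alternative decomposition, same cost).

-- ===== PORT A =====
def code_block (text : String) : String :=
  let text := ([("\\", "\\\\"), ("`", "\\`")] : List (String × String)).foldl
    (fun t p => PySem.Str.replace t p.1 p.2) text
  "```\n" ++ text ++ "\n```"

-- ===== PORT B =====
def code_block_alt (text : String) : String :=
  let escaped := String.ofList (text.toList.flatMap
    (fun c => if c = '\\' then ['\\', '\\'] else if c = '`' then ['\\', c] else [c]))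
  "```\n" ++ escaped ++ "\n```"

-- ===== PRECONDITION & SPEC =====
def Spec_code_block (text : String) (out : String) : Prop := out = code_block_alt text
instance (text : String) (out : String) : Decidable (Spec_code_block text out) := by unfold Spec_code_block; infer_instance

-- ===== CLAIM (what is proved, stated in full; the proofs are below) =====
def Claim_equal_code_block : Prop := ∀ (text : String), Dom_code_block text → Spec_code_block text (code_block text)

-- ===== LEMMAS AND PROOFS =====

-- single-character pattern replace is a per-character flatMap
theorem replace_go_single (a : Char) (new : List Char) :
    ∀ (l : List Char) (fuel : Nat) (acc : List Char), l.length ≤ fuel →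
      PySem.Chars.replace.go [a] new fuel l acc
        = acc.reverse ++ l.flatMap (fun c => if c = a then new else [c]) := by
  intro l
  induction l with
  | nil =>
    intro fuel acc _
    cases fuel <;> simp [PySem.Chars.replace.go]
  | cons c t ih =>
    intro fuel acc hle
    cases fuel with
    | zero => simp at hle
    | succ f =>
      by_cases hc : c = a
      · subst hc
        have hpre : ([c] : List Char).isPrefixOf (c :: t) = true := by
          simp [List.isPrefixOf]
        simp only [PySem.Chars.replace.go, hpre, if_pos, List.length_cons,
          List.length_nil, List.drop_succ_cons, List.drop_zero]
        rw [ih f (new.reverse ++ acc) (by simpa using Nat.le_of_succ_le_succ hle)]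
        simp
      · have hpre : ([a] : List Char).isPrefixOf (c :: t) = false := by
          simp [List.isPrefixOf, Ne.symm hc]
        simp only [PySem.Chars.replace.go, hpre]
        rw [ih f (c :: acc) (by simpa using Nat.le_of_succ_le_succ hle)]
        simp [hc]

theorem replace_single (a : Char) (new cs : List Char) :
    PySem.Chars.replace cs [a] new = cs.flatMap (fun c => if c = a then new else [c]) := by
  rw [PySem.Chars.replace]
  simp [replace_go_single a new cs cs.length [] (le_refl _)]

-- ===== VERDICT (by name: the statement is the Claim_ definition above) =====
theorem code_block_spec : Claim_equal_code_block := by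
  intro text _
  unfold Spec_code_block code_block code_block_alt
  simp only [List.foldl, PySem.Str.replace]
  have h1 : ("\\" : String).toList = ['\\'] := by decide
  have h2 : ("\\\\" : String).toList = ['\\', '\\'] := by decide
  have h3 : ("`" : String).toList = ['`'] := by decide
  have h4 : ("\\`" : String).toList = ['\\', '`'] := by decide
  rw [h1, h2, h3, h4]
  simp only [replace_single, String.toList_ofList, List.flatMap_assoc]
  congr 2
  apply congrArg String.ofList
  apply List.flatMap_congr
  intro c _
  by_cases hb : c = '\\'
  · subst hb; decide
  · by_cases hg : c = '`'
    · subst hg; decide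
    · simp [hb, hg]
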